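-- pv_equiv track=rewrite | github.com/BenKnighton/Merlin | protocols.py | propoun_detection
-- ===== SOURCE A (Python) =====
-- def propoun_detection(text):
--     #filtering
--     text = text.replace(".", "").replace("?", "")
--     text = " "+text.lower()+" "
--     dist = False
--     pronouns = ["they", "he", "she", "their", "his", "her", "him", "it"]
--     for pronoun in pronouns:
--         if " "+pronoun+" " in text:
--             dist = True
--             break
--
--     if dist:
--         return True
--     else:
--         return None
-- ===== SOURCE B (Python) =====
-- def propoun_detection(text):
--     # same filtering as before, then one pass over space-split tokens with set membership
--     pronouns = {"they", "he", "she", "their", "his", "her", "him", "it"}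
--     tokens = text.replace(".", "").replace("?", "").lower().split(" ")
--     if any(t in pronouns for t in tokens):
--         return True
--     return None
-- ===== Notes on version B (the rewrite author's own statement) =====
-- stated objective: idiomatic
-- what changed: Instead of scanning the whole space-padded text once per pronoun for a space-delimited substring, B splits the filtered text on the single space character once and checks each token for membership in a set of the 8 pronouns.
import Mathlib
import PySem

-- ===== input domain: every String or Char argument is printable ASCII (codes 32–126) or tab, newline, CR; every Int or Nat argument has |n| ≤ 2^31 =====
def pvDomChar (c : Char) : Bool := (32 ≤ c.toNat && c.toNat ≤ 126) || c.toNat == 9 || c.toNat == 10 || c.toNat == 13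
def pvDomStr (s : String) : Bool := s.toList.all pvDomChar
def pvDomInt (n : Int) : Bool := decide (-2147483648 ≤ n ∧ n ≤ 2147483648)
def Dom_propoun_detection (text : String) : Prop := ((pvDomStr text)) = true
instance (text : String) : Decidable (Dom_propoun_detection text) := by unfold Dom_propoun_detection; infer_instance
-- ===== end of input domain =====

-- B replaces A's eight padded-substring scans by one split on ' ' plus set membership of each token.


def pronounsList : List (List Char) :=
  ["they".toList, "he".toList, "she".toList, "their".toList,
   "his".toList, "her".toList, "him".toList, "it".toList]

-- ===== PORT A =====
-- filtering: remove '.' and '?', lowercase, pad with spaces; then for each pronoun test " p " in text (loop with break = any)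
def propoun_detection (text : String) : Option Bool :=
  let filtered := PySem.Chars.replace (PySem.Chars.replace text.toList ['.'] []) ['?'] []
  let padded := ' ' :: PySem.Chars.lower filtered ++ [' ']
  let dist := pronounsList.any (fun p => PySem.Chars.isIn (' ' :: p ++ [' ']) padded)
  if dist then some true else none

-- ===== PORT B =====
-- same filtering, split on the literal ' ' (Python str.split(" ") = List.splitOn ' '), any token in the pronoun set
def propoun_detection_alt (text : String) : Option Bool :=
  let pronouns : PySem.Set (List Char) := PySem.Set.ofList pronounsList
  let tokens := (PySem.Chars.lower
      (PySem.Chars.replace (PySem.Chars.replace text.toList ['.'] []) ['?'] [])).splitOn ' '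
  if tokens.any (fun t => pronouns.contains t) then some true else none

-- ===== PRECONDITION & SPEC =====
def Spec_propoun_detection (text : String) (out : Option Bool) : Prop := out = propoun_detection_alt text
instance (text : String) (out : Option Bool) : Decidable (Spec_propoun_detection text out) := by unfold Spec_propoun_detection; infer_instance

-- ===== CLAIM (what is proved, stated in full; the proofs are below) =====
def Claim_equal_propoun_detection : Prop := ∀ (text : String), Dom_propoun_detection text → Spec_propoun_detection text (propoun_detection text)

-- ===== LEMMAS AND PROOFS =====

-- a space-delimited prefix determines the first space-free block
lemma pref_eq (p : List Char) : ∀ (t u v : List Char), ' ' ∉ p → ' ' ∉ t →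
    p ++ ' ' :: u <+: t ++ ' ' :: v → p = t := by
  induction p with
  | nil =>
    intro t u v _ ht h
    cases t with
    | nil => rfl
    | cons b t' =>
      simp only [List.nil_append, List.cons_append, List.cons_prefix_cons] at h
      exact absurd (h.1 ▸ List.mem_cons_self) ht
  | cons a p' ih =>
    intro t u v hp ht h
    cases t with
    | nil =>
      simp only [List.cons_append, List.nil_append, List.cons_prefix_cons] at h
      exact absurd (h.1 ▸ List.mem_cons_self) hp
    | cons b t' =>
      simp only [List.cons_append, List.cons_prefix_cons] at h
      have := ih t' u v (fun hm => hp (List.mem_cons_of_mem a hm))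
        (fun hm => ht (List.mem_cons_of_mem b hm)) h.2
      rw [h.1, this]

-- an infix starting with ' ' cannot start inside a space-free block
lemma skip_block (t : List Char) : ∀ (r m : List Char), ' ' ∉ t →
    (' ' :: m) <:+: (t ++ r) → (' ' :: m) <:+: r := by
  induction t with
  | nil => intro r m _ h; simpa using h
  | cons a t' ih =>
    intro r m ht h
    rcases List.infix_cons_iff.1 h with hpre | hinf
    · rw [List.cons_prefix_cons] at hpre
      exact absurd (hpre.1 ▸ List.mem_cons_self) ht
    · exact ih r m (fun hm => ht (List.mem_cons_of_mem a hm)) hinf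

-- the padded-substring test on an intercalation of space-free blocks is membership
lemma padded_infix_iff (ts : List (List Char)) : ∀ (p : List Char), ts ≠ [] →
    (∀ t ∈ ts, ' ' ∉ t) → ' ' ∉ p →
    ((' ' :: p ++ [' ']) <:+: (' ' :: [' '].intercalate ts ++ [' ']) ↔ p ∈ ts) := by
  induction ts with
  | nil => intro p h; exact absurd rfl h
  | cons t ts' ih =>
    intro p _ hts hp
    have ht : ' ' ∉ t := hts t List.mem_cons_self
    cases ts' with
    | nil =>
      have hIc : [' '].intercalate [t] = t := by simp [List.intercalate]
      rw [hIc]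
      simp only [List.mem_singleton]
      constructor
      · intro h
        simp only [List.cons_append] at h
        rcases List.infix_cons_iff.1 h with hpre | hinf
        · rw [List.cons_prefix_cons] at hpre
          have : p ++ ' ' :: ([] : List Char) <+: t ++ ' ' :: ([] : List Char) := by
            simpa using hpre.2
          exact pref_eq p t [] [] hp ht this
        · have h2 := skip_block t [' '] (p ++ [' ']) ht hinf
          have := h2.length_le
          simp at this
      · intro h; subst h; simp
    | cons u us =>
      have hIc : [' '].intercalate (t :: u :: us) = t ++ ' ' :: [' '].intercalate (u :: us) := by
        simp [List.intercalate]
      rw [hIc]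
      have hts' : ∀ x ∈ u :: us, ' ' ∉ x := fun x hx => hts x (List.mem_cons_of_mem t hx)
      constructor
      · intro h
        simp only [List.cons_append, List.append_assoc] at h
        rcases List.infix_cons_iff.1 h with hpre | hinf
        · rw [List.cons_prefix_cons] at hpre
          have : p ++ ' ' :: ([] : List Char) <+:
              t ++ ' ' :: ([' '].intercalate (u :: us) ++ [' ']) := by
            simpa using hpre.2
          exact (pref_eq p t [] _ hp ht this) ▸ List.mem_cons_self
        · have h2 := skip_block t (' ' :: ([' '].intercalate (u :: us) ++ [' ']))
            (p ++ [' ']) ht hinf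
          have := (ih p (by simp) hts' hp).1 (by simpa [List.cons_append] using h2)
          exact List.mem_cons_of_mem t this
      · intro h
        simp only [List.cons_append, List.append_assoc]
        rcases List.mem_cons.1 h with rfl | hmem
        · refine List.IsPrefix.isInfix ?_
          rw [List.cons_prefix_cons]
          exact ⟨rfl, by simp⟩
        · have h2 := (ih p (by simp) hts' hp).2 hmem
          have h2' : (' ' :: (p ++ [' '])) <:+:
              (' ' :: ([' '].intercalate (u :: us) ++ [' '])) := by
            simpa [List.cons_append] using h2
          have hsuf : (' ' :: ([' '].intercalate (u :: us) ++ [' '])) <:+: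
              (' ' :: (t ++ ' ' :: ([' '].intercalate (u :: us) ++ [' ']))) :=
            ⟨' ' :: t, [], by simp⟩
          exact h2'.trans hsuf

-- tokens produced by splitOn ' ' are space-free
lemma splitOn_space_free (cs : List Char) : ∀ t ∈ cs.splitOn ' ', ' ' ∉ t := by
  induction cs with
  | nil =>
    intro t ht
    rw [List.splitOn_nil] at ht
    simp only [List.mem_singleton] at ht
    subst ht
    simp
  | cons a cs ih =>
    intro t ht
    rw [List.splitOn, List.splitOnP_cons] at ht
    by_cases ha : a = ' '
    · simp [ha] at ht
      rcases ht with rfl | hmem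
      · simp
      · exact ih t hmem
    · simp [ha] at ht
      rcases hcs : List.splitOn ' ' cs with _ | ⟨h0, rest⟩
      · exact absurd hcs (List.splitOnP_ne_nil _ _)
      · rw [List.splitOn] at hcs
        rw [hcs] at ht
        simp [List.modifyHead] at ht
        rcases ht with rfl | hmem
        · intro hmem'
          rcases List.mem_cons.1 hmem' with h' | h'
          · exact ha h'.symm
          · exact ih h0 (by rw [List.splitOn, hcs]; exact List.mem_cons_self) h'
        · exact ih t (by rw [List.splitOn, hcs]; exact List.mem_cons_of_mem h0 hmem)

-- the core per-pronoun fact: " p " in " cs " ⟺ p is a token of cs.split(" ")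
lemma key (cs p : List Char) (hp : ' ' ∉ p) :
    PySem.Chars.isIn (' ' :: p ++ [' ']) (' ' :: cs ++ [' ']) = true ↔ p ∈ cs.splitOn ' ' := by
  rw [PySem.Chars.isIn_iff_infix]
  conv_lhs => rw [← List.intercalate_splitOn cs ' ']
  exact padded_infix_iff (cs.splitOn ' ') p (List.splitOnP_ne_nil _ _)
    (splitOn_space_free cs) hp

lemma pronoun_space_free (p : List Char) (hp : p ∈ pronounsList) : ' ' ∉ p := by
  fin_cases hp <;> decide

lemma ofList_pronouns : PySem.Set.ofList pronounsList = pronounsList := by decide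

lemma dist_eq (cs : List Char) :
    (pronounsList.any fun p => PySem.Chars.isIn (' ' :: p ++ [' ']) (' ' :: cs ++ [' ']))
    = ((cs.splitOn ' ').any fun t => PySem.Set.contains (PySem.Set.ofList pronounsList) t) := by
  rw [ofList_pronouns, Bool.eq_iff_iff, List.any_eq_true, List.any_eq_true]
  constructor
  · rintro ⟨p, hp, hin⟩
    refine ⟨p, (key cs p (pronoun_space_free p hp)).1 hin, ?_⟩
    exact List.contains_iff_mem.mpr hp
  · rintro ⟨t, ht, hc⟩
    have hmem : t ∈ pronounsList := List.contains_iff_mem.mp hc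
    exact ⟨t, hmem, (key cs t (pronoun_space_free t hmem)).2 ht⟩

-- ===== VERDICT (by name: the statement is the Claim_ definition above) =====
theorem propoun_detection_spec : Claim_equal_propoun_detection := by
  intro text _
  simp only [Spec_propoun_detection, propoun_detection, propoun_detection_alt, dist_eq]
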